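-- pv_equiv track=rewrite | github.com/blubbity/codingPractice | KickStart/2013/Practice Round/moist.py | find_cost
-- ===== SOURCE A (Python) =====
-- def find_cost(card_list):
-- 	cost = 0
-- 	if len(card_list) > 1:
-- 		for i in range(1, len(card_list)):
-- 			if card_list[i-1] > card_list[i]:
-- 				cost+=1
-- 				card_list[i] = card_list[i-1]
-- 	return cost
-- ===== SOURCE B (Python) =====
-- def find_cost(card_list):
--     if len(card_list) <= 1:
--         return 0
--     cm = []
--     m = card_list[0]
--     for x in card_list:
--         m = m if m > x else x
--         cm.append(m)
--     cost = sum(1 for i in range(1, len(card_list)) if card_list[i] < cm[i - 1])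
--     card_list[:] = cm
--     return cost
-- ===== Notes on version B (the rewrite author's own statement) =====
-- stated objective: alternative
-- what changed: Replaces A's fused count-and-mutate loop with a two-phase decomposition: first build the cumulative-maximum table in one pass, then a separate counting pass compares each element with the table, and the list is finally rewritten wholesale from the table (same in-place effect as A).
import Mathlib
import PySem

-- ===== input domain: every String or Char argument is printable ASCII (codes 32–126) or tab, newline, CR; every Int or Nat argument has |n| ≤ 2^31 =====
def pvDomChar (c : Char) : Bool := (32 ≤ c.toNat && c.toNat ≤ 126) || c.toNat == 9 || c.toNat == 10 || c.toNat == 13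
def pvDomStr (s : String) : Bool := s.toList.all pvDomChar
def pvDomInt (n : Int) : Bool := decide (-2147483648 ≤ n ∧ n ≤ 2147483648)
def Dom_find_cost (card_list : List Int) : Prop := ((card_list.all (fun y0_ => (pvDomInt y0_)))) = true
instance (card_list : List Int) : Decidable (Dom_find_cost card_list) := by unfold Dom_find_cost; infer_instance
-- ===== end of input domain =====

-- B replaces A's fused count-and-mutate loop by a cumulative-maximum table pass plus a separate
-- counting pass (objective: alternative decomposition). Python A mutates card_list in place and
-- Python B performs the same final mutation (card_list[:] = cm); the Lean claim is about the return value.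

-- ===== PORT A =====
def find_cost (card_list : List Int) : Int :=
  if card_list.length > 1 then
    ((PySem.List.pyRange 1 (card_list.length : Int) 1).foldl
      (fun (st : Int × List Int) i =>
        if PySem.List.pyGetD st.2 (i - 1) 0 > PySem.List.pyGetD st.2 i 0 then
          (st.1 + 1, PySem.List.pySetD st.2 i (PySem.List.pyGetD st.2 (i - 1) 0))
        else st)
      (0, card_list)).1
  else 0

-- ===== PORT B =====
def find_cost_alt (card_list : List Int) : Int :=
  if card_list.length ≤ 1 then 0
  else
    let cm := (card_list.foldl
      (fun (st : Int × List Int) x =>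
        let m := if st.1 > x then st.1 else x
        (m, st.2 ++ [m]))
      (PySem.List.pyGetD card_list 0 0, [])).2
    (PySem.List.pyRange 1 (card_list.length : Int) 1).foldl
      (fun cost i =>
        if PySem.List.pyGetD card_list i 0 < PySem.List.pyGetD cm (i - 1) 0 then cost + 1 else cost)
      0

-- ===== PRECONDITION & SPEC =====
def Spec_find_cost (card_list : List Int) (out : Int) : Prop := out = find_cost_alt card_list
instance (card_list : List Int) (out : Int) : Decidable (Spec_find_cost card_list out) := by unfold Spec_find_cost; infer_instance

-- ===== CLAIM (what is proved, stated in full; the proofs are below) =====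
def Claim_equal_find_cost : Prop := ∀ (card_list : List Int), Dom_find_cost card_list → Spec_find_cost card_list (find_cost card_list)

-- ===== LEMMAS AND PROOFS =====

/-- Cumulative maximum of a list, seeded with `m` (spec of B's table-building pass). -/
def cmaxL (m : Int) : List Int → List Int
  | [] => []
  | x :: xs => (if m > x then m else x) :: cmaxL (if m > x then m else x) xs

theorem cmaxL_length (m : Int) (l : List Int) : (cmaxL m l).length = l.length := by
  induction l generalizing m with
  | nil => rfl
  | cons x xs ih => simp [cmaxL, ih]

/-- B's first pass builds exactly `cmaxL`. -/
theorem foldB_snd (l : List Int) (m : Int) (acc : List Int) :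
    (l.foldl (fun (st : Int × List Int) x =>
        let m := if st.1 > x then st.1 else x
        (m, st.2 ++ [m])) (m, acc)).2
      = acc ++ cmaxL m l := by
  induction l generalizing m acc with
  | nil => simp [cmaxL]
  | cons x xs ih => simp [List.foldl_cons, ih, cmaxL]

/-- Recurrence of the cumulative maximum at successive indices. -/
theorem cmaxL_getD_succ (l : List Int) (m : Int) (k : Nat) (hk : k + 1 < l.length) :
    (cmaxL m l).getD (k + 1) 0 =
      if (cmaxL m l).getD k 0 > l.getD (k + 1) 0 then (cmaxL m l).getD k 0
      else l.getD (k + 1) 0 := by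
  induction l generalizing m k with
  | nil => simp at hk
  | cons x xs ih =>
    cases k with
    | zero =>
      cases xs with
      | nil => simp at hk
      | cons y ys => simp [cmaxL]
    | succ k =>
      have hk' : k + 1 < xs.length := by simpa using hk
      simpa [cmaxL] using ih (if m > x then m else x) k hk'

/-- Indexing into the hybrid list `cm.take k ++ l.drop k`. -/
theorem getD_take_append_drop (cm l : List Int) (k j : Nat) (hcm : k ≤ cm.length) :
    (cm.take k ++ l.drop k).getD j 0 = if j < k then cm.getD j 0 else l.getD j 0 := by
  have h1 : (cm.take k).length = k := by simp [List.length_take]; omega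
  by_cases h : j < k
  · rw [if_pos h, List.getD_append _ _ _ _ (by omega)]
    simp [List.getD_eq_getElem?_getD, List.getElem?_take_of_lt h]
  · rw [if_neg h, List.getD_append_right _ _ _ _ (by omega), h1]
    simp only [List.getD_eq_getElem?_getD, List.getElem?_drop]
    rw [show k + (j - k) = j from by omega]

/-- Loop invariant: after `k - 1` iterations A's state is (B's count so far, cummax prefix ++ untouched rest). -/
theorem find_cost_inv (l : List Int) (hl : 1 < l.length) :
    ∀ (k : Nat), 1 ≤ k → k ≤ l.length →
    (PySem.List.pyRange 1 (k : Int) 1).foldl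
        (fun (st : Int × List Int) i =>
          if PySem.List.pyGetD st.2 (i - 1) 0 > PySem.List.pyGetD st.2 i 0 then
            (st.1 + 1, PySem.List.pySetD st.2 i (PySem.List.pyGetD st.2 (i - 1) 0))
          else st) (0, l)
      = ((PySem.List.pyRange 1 (k : Int) 1).foldl
          (fun cost i =>
            if PySem.List.pyGetD l i 0 < PySem.List.pyGetD (cmaxL (l.getD 0 0) l) (i - 1) 0 then
              cost + 1 else cost) 0,
        (cmaxL (l.getD 0 0) l).take k ++ l.drop k) := by
  intro k
  induction k with
  | zero => omega
  | succ k ih =>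
    intro _ hk1
    by_cases hk0 : k = 0
    · subst hk0
      rw [PySem.List.pyRange_one_eq_nil (by norm_num)]
      simp only [List.foldl_nil]
      cases l with
      | nil => simp at hl
      | cons x xs => simp [cmaxL]
    · have hk : 1 ≤ k := by omega
      have hc : ((k + 1 : Nat) : Int) = (k : Int) + 1 := by push_cast; ring
      rw [hc, PySem.List.pyRange_one_succ_right (by exact_mod_cast hk),
        List.foldl_append, List.foldl_append, ih hk (by omega)]
      simp only [List.foldl_cons, List.foldl_nil]
      obtain ⟨j, rfl⟩ : ∃ j, k = j + 1 := ⟨k - 1, by omega⟩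
      have e1 : ((j + 1 : Nat) : Int) - 1 = ((j : Nat) : Int) := by push_cast; ring
      rw [e1]
      simp only [PySem.List.pyGetD_natCast, PySem.List.pySetD_natCast]
      have hM1 : ((cmaxL (l.getD 0 0) l).take (j + 1) ++ l.drop (j + 1)).getD j 0
          = (cmaxL (l.getD 0 0) l).getD j 0 := by
        rw [getD_take_append_drop _ _ _ _ (by rw [cmaxL_length]; omega), if_pos (by omega)]
      have hM2 : ((cmaxL (l.getD 0 0) l).take (j + 1) ++ l.drop (j + 1)).getD (j + 1) 0
          = l.getD (j + 1) 0 := by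
        rw [getD_take_append_drop _ _ _ _ (by rw [cmaxL_length]; omega), if_neg (by omega)]
      rw [hM1, hM2]
      have hrec := cmaxL_getD_succ l (l.getD 0 0) j (by omega)
      have hdrop : l.drop (j + 1) = l.getD (j + 1) 0 :: l.drop (j + 1 + 1) := by
        rw [List.drop_eq_getElem_cons (by omega : j + 1 < l.length),
          List.getD_eq_getElem l 0 (by omega : j + 1 < l.length)]
      have htl : ((cmaxL (l.getD 0 0) l).take (j + 1)).length = j + 1 := by
        simp [List.length_take, cmaxL_length]; omega
      have hMset : ∀ v : Int,
          ((cmaxL (l.getD 0 0) l).take (j + 1) ++ l.drop (j + 1)).set (j + 1) v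
            = (cmaxL (l.getD 0 0) l).take (j + 1) ++ v :: l.drop (j + 1 + 1) := by
        intro v
        rw [List.set_append_right _ _ (by omega), htl, Nat.sub_self, hdrop, List.set_cons_zero]
      have htake : (cmaxL (l.getD 0 0) l).take (j + 1 + 1)
          = (cmaxL (l.getD 0 0) l).take (j + 1) ++ [(cmaxL (l.getD 0 0) l).getD (j + 1) 0] := by
        rw [List.take_add_one]
        congr 1
        rw [List.getElem?_eq_getElem (by rw [cmaxL_length]; omega : j + 1 < (cmaxL (l.getD 0 0) l).length)]
        rw [List.getD_eq_getElem _ 0 (by rw [cmaxL_length]; omega : j + 1 < (cmaxL (l.getD 0 0) l).length)]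
        rfl
      simp only [gt_iff_lt] at hrec ⊢
      split_ifs with h
      · simp only [Prod.mk.injEq, true_and]
        rw [hMset, htake, hrec, if_pos h]
        simp [List.append_assoc]
      · simp only [Prod.mk.injEq, true_and]
        rw [htake, hrec, if_neg h, hdrop]
        simp [List.append_assoc]

-- ===== VERDICT (by name: the statement is the Claim_ definition above) =====
theorem find_cost_spec : Claim_equal_find_cost := by
  intro l _hd
  unfold Spec_find_cost find_cost find_cost_alt
  by_cases hl : 1 < l.length
  · rw [if_pos hl, if_neg (by omega)]
    rw [foldB_snd]
    simp only [List.nil_append, PySem.List.pyGetD_zero]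
    rw [find_cost_inv l hl l.length (by omega) le_rfl]
  · rw [if_neg hl, if_pos (by omega)]
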